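-- pv_equiv track=rewrite | github.com/Arkarachai/falcon_unzip_assessment | visualize_misphased_contigs_properties/resources/home/dnanexus/visual_falcon_unzip_prep.py | error_pattern
-- ===== SOURCE A (Python) =====
-- def error_pattern(alist):
--     if len(set(alist)) == 1:
--         return 0, set()
--     mergeword = ''.join(alist)
--     switch_counter = 0
--     position = 1
--     end_switch_position = set()
--     currentword = mergeword[0]
--     for character in mergeword[1::]:
--         if character != currentword:
--             switch_counter += 1
--             end_switch_position.add(position)
--         currentword = character
--         position += 1
--     return switch_counter, end_switch_position
-- ===== SOURCE B (Python) =====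
-- def error_pattern(alist):
--     if len(set(alist)) == 1:
--         return 0, set()
--     mergeword = ''.join(alist)
--     # run-length encode: lengths of maximal runs of equal characters
--     runs = []
--     i, n = 0, len(mergeword)
--     while i < n:
--         j = i
--         while j < n and mergeword[j] == mergeword[i]:
--             j += 1
--         runs.append(j - i)
--         i = j
--     # boundaries between runs = prefix sums of all runs but the last
--     positions = set()
--     acc = 0
--     for r in runs[:-1]:
--         acc += r
--         positions.add(acc)
--     return len(runs) - 1, positions
-- ===== Notes on version B (the rewrite author's own statement) =====
-- stated objective: alternative
-- what changed: B run-length encodes the merged string and derives the switch count as (number of runs - 1) and the switch positions as prefix sums of the run lengths, instead of A's single scan over adjacent character pairs with a position counter.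
import Mathlib
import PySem

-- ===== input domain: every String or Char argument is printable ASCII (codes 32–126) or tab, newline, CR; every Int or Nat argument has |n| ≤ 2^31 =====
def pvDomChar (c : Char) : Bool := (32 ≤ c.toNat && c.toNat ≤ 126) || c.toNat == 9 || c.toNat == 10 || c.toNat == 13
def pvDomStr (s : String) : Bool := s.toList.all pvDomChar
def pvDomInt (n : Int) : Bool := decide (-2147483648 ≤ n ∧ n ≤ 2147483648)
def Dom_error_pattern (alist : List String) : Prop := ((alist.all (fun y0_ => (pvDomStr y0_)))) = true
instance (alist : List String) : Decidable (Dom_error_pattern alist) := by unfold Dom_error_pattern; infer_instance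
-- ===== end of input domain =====

-- B replaces A's adjacent-pair scan by a run-length encoding whose count is (#runs - 1) and whose positions are prefix sums of run lengths; same cost, different decomposition.


-- ===== PORT A =====
-- ''.join(alist) as a list of characters (exact: concatenation of the characters of each string)
def error_pattern (alist : List String) : Int × List Int :=
  if PySem.Set.len (PySem.Set.ofList alist) = 1 then (0, [])
  else
    let mergeword := (PySem.Str.join "" alist).toList
    match mergeword with
    | [] => (0, [])   -- unreachable inside Pre_: Python raises IndexError on mergeword[0] here (alist = [])
    | c0 :: rest =>
      -- state: (switch_counter, position, currentword, end_switch_position)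
      let st := rest.foldl
        (fun (st : Int × Int × Char × List Int) character =>
          let (sc, pos, cur, s) := st
          if character ≠ cur then (sc + 1, pos + 1, character, PySem.Set.add s pos)
          else (sc, pos + 1, character, s))
        (0, 1, c0, PySem.Set.empty)
      (st.1, st.2.2.2)

-- ===== PORT B =====
-- inner while loop of Source B: split off the leading run of characters equal to c
def pvRunSplit (c : Char) : List Char → Nat × List Char
  | [] => (0, [])
  | x :: xs => if x = c then
      let p := pvRunSplit c xs
      (p.1 + 1, p.2)
    else (0, x :: xs)

theorem pvRunSplit_len (c : Char) (xs : List Char) : (pvRunSplit c xs).2.length ≤ xs.length := by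
  induction xs with
  | nil => simp [pvRunSplit]
  | cons x xs ih =>
    by_cases h : x = c
    · simp [pvRunSplit, h]; omega
    · simp [pvRunSplit, h]

-- outer while loop of Source B: the list of run lengths
def pvRuns : List Char → List Int
  | [] => []
  | c :: xs => (((pvRunSplit c xs).1 : Int) + 1) :: pvRuns (pvRunSplit c xs).2
termination_by l => l.length
decreasing_by
  simp only [List.length_cons]
  exact Nat.lt_succ_of_le (pvRunSplit_len c xs)

def error_pattern_alt (alist : List String) : Int × List Int :=
  if PySem.Set.len (PySem.Set.ofList alist) = 1 then (0, [])
  else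
    let runs := pvRuns (PySem.Str.join "" alist).toList
    let p := runs.dropLast.foldl
      (fun (st : Int × List Int) r => (st.1 + r, PySem.Set.add st.2 (st.1 + r)))
      (0, PySem.Set.empty)
    ((runs.length : Int) - 1, p.2)

-- ===== PRECONDITION & SPEC =====
-- Pre_ excludes only the empty list, on which the Python A raises IndexError (mergeword[0] of '').
def Pre_error_pattern (alist : List String) : Prop := alist ≠ []
instance (alist : List String) : Decidable (Pre_error_pattern alist) := by unfold Pre_error_pattern; infer_instance
def pvWitness_error_pattern : List String := ["ab", "a"]

def Spec_error_pattern (alist : List String) (out : Int × List Int) : Prop := out = error_pattern_alt alist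
instance (alist : List String) (out : Int × List Int) : Decidable (Spec_error_pattern alist out) := by unfold Spec_error_pattern; infer_instance

-- ===== CLAIM (what is proved, stated in full; the proofs are below) =====
def Claim_equal_error_pattern : Prop := ∀ (alist : List String), Dom_error_pattern alist → Pre_error_pattern alist → Spec_error_pattern alist (error_pattern alist)

-- ===== LEMMAS AND PROOFS =====

-- boundary positions of a character list, scanned with current character c starting at position p
def pvBnd : Char → List Char → Int → List Int
  | _, [], _ => []
  | c, x :: xs, p => if x ≠ c then p :: pvBnd x xs (p + 1) else pvBnd x xs (p + 1)

-- Chars.join with empty separator is flatten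
theorem pvJoin_nil_eq_flatten (l : List (List Char)) : PySem.Chars.join [] l = l.flatten := by
  induction l with
  | nil => simp [PySem.Chars.join_nil]
  | cons a l ih =>
    cases l with
    | nil => simp [PySem.Chars.join_singleton]
    | cons b t => rw [PySem.Chars.join_cons_cons] at *; simp_all

-- A's fold computes (sc0 + #boundaries, …, s0 ++ boundaries)
theorem pvFoldA (rest : List Char) (cur : Char) (sc0 p0 : Int) (s0 : List Int)
    (hs : ∀ y ∈ s0, y < p0) :
    ∃ c', rest.foldl
        (fun (st : Int × Int × Char × List Int) character =>
          if character ≠ st.2.2.1 then (st.1 + 1, st.2.1 + 1, character, PySem.Set.add st.2.2.2 st.2.1)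
          else (st.1, st.2.1 + 1, character, st.2.2.2))
        (sc0, p0, cur, s0)
      = (sc0 + ((pvBnd cur rest p0).length : Int), p0 + rest.length, c', s0 ++ pvBnd cur rest p0) := by
  induction rest generalizing cur sc0 p0 s0 with
  | nil => exact ⟨cur, by simp [pvBnd]⟩
  | cons x xs ih =>
    by_cases h : x = cur
    · subst h
      obtain ⟨c', hc⟩ := ih x sc0 (p0 + 1) s0 (fun y hy => by have := hs y hy; omega)
      refine ⟨c', ?_⟩
      simp only [List.foldl_cons]
      rw [if_neg (show ¬(x ≠ x) by simp), hc]
      simp only [pvBnd]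
      rw [if_neg (show ¬(x ≠ x) by simp)]
      refine Prod.ext rfl (Prod.ext ?_ rfl)
      simp only [List.length_cons]; push_cast; ring
    · have hadd : PySem.Set.add s0 p0 = s0 ++ [p0] :=
        PySem.Set.add_of_not_mem (fun hmem => by have := hs p0 hmem; omega)
      obtain ⟨c', hc⟩ := ih x (sc0 + 1) (p0 + 1) (s0 ++ [p0])
        (fun y hy => by rcases List.mem_append.1 hy with h' | h' <;> [skip; simp at h'] <;> [have := hs y h'; subst h'] <;> omega)
      refine ⟨c', ?_⟩
      simp only [List.foldl_cons, hadd]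
      rw [if_pos (show x ≠ cur from h), hc]
      simp only [pvBnd]
      rw [if_pos (show x ≠ cur from h)]
      refine Prod.ext ?_ (Prod.ext ?_ (Prod.ext rfl ?_))
      · simp only [List.length_cons]; push_cast; ring
      · simp only [List.length_cons]; push_cast; ring
      · simp

-- helper: boundaries of a whole list (empty list has none)
def pvBndL : List Char → Int → List Int
  | [], _ => []
  | c :: xs, p => pvBnd c xs p

theorem pvBnd_split (c : Char) (xs : List Char) (p : Int) :
    pvBnd c xs p = match pvRunSplit c xs with
      | (_, []) => []
      | (k, d :: r') => (p + (k : Int)) :: pvBnd d r' (p + (k : Int) + 1) := by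
  induction xs generalizing p with
  | nil => simp [pvBnd, pvRunSplit]
  | cons y ys ih =>
    by_cases h : y = c
    · subst h
      have h1 : pvRunSplit y (y :: ys) = ((pvRunSplit y ys).1 + 1, (pvRunSplit y ys).2) := by
        simp [pvRunSplit]
      have h2 : pvBnd y (y :: ys) p = pvBnd y ys (p + 1) := by
        simp [pvBnd]
      rw [h2, ih (p + 1), h1]
      rcases hr : pvRunSplit y ys with ⟨k, r⟩
      cases r with
      | nil => simp
      | cons d r' =>
        simp only []
        congr 1
        · push_cast; ring
        · congr 1; push_cast; ring
    · have h1 : pvRunSplit c (y :: ys) = (0, y :: ys) := by simp [pvRunSplit, h]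
      have h2 : pvBnd c (y :: ys) p = p :: pvBnd y ys (p + 1) := by
        simp [pvBnd, h]
      rw [h2, h1]
      norm_num

theorem pvRuns_length (l : List Char) : ∀ p : Int, l ≠ [] → (pvRuns l).length = (pvBndL l p).length + 1 := by
  induction l using pvRuns.induct with
  | case1 => exact fun p h => absurd rfl h
  | case2 c xs ih =>
    intro p _
    rcases hr : pvRunSplit c xs with ⟨k, r⟩
    simp only [hr] at ih
    simp only [pvRuns, hr, List.length_cons, pvBndL, pvBnd_split c xs p]
    cases r with
    | nil => simp [pvRuns]
    | cons d r' =>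
      have := ih (p + (k : Int) + 1) (by simp)
      simp only [pvBndL] at this
      simp [this]

theorem pvFoldB (l : List Char) : ∀ (a : Int) (acc : List Int), (∀ y ∈ acc, y ≤ a) →
    ∃ a', (pvRuns l).dropLast.foldl
        (fun (st : Int × List Int) r => (st.1 + r, PySem.Set.add st.2 (st.1 + r)))
        (a, acc)
      = (a', acc ++ pvBndL l (a + 1)) := by
  induction l using pvRuns.induct with
  | case1 => exact fun a acc _ => ⟨a, by simp [pvRuns, pvBndL]⟩
  | case2 c xs ih =>
    intro a acc hacc
    rcases hr : pvRunSplit c xs with ⟨k, r⟩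
    simp only [hr] at ih
    simp only [pvRuns, hr]
    cases r with
    | nil =>
      refine ⟨a, ?_⟩
      simp [pvRuns, pvBndL, pvBnd_split c xs (a + 1), hr]
    | cons d r' =>
      have hmem : (a + ((k : Int) + 1)) ∉ acc := fun hmem => by
        have := hacc _ hmem; omega
      have hadd : PySem.Set.add acc (a + ((k : Int) + 1)) = acc ++ [a + ((k : Int) + 1)] :=
        PySem.Set.add_of_not_mem hmem
      obtain ⟨a', ha⟩ := ih (a + ((k : Int) + 1)) (acc ++ [a + ((k : Int) + 1)])
        (fun y hy => by
          rcases List.mem_append.1 hy with h' | h'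
          · have := hacc y h'; omega
          · simp at h'; omega)
      refine ⟨a', ?_⟩
      have hne : pvRuns (d :: r') ≠ [] := by simp [pvRuns]
      rw [List.dropLast_cons_of_ne_nil hne, List.foldl_cons]
      simp only [hadd] at ha ⊢
      rw [ha]
      simp only [pvBndL, pvBnd_split c xs (a + 1), hr, List.append_assoc, List.singleton_append]
      congr 2
      all_goals (push_cast; ring_nf)

theorem pvMergeNonempty (alist : List String) (h1 : alist ≠ [])
    (h2 : ¬ PySem.Set.len (PySem.Set.ofList alist) = 1) :
    (PySem.Str.join "" alist).toList ≠ [] := by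
  intro hnil
  apply h2
  rw [PySem.Str.toList_join] at hnil
  simp only [String.toList_empty] at hnil
  rw [pvJoin_nil_eq_flatten, List.flatten_eq_nil_iff] at hnil
  have hall : ∀ s ∈ alist, s = "" := by
    intro s hs
    exact String.toList_eq_nil_iff.mp (hnil _ (List.mem_map_of_mem hs))
  rcases alist with _ | ⟨a, t⟩
  · exact absurd rfl h1
  · have ha : a = "" := hall a (by simp)
    subst ha
    have hdis : PySem.Set.discard (PySem.Set.ofList t) "" = [] := by
      rw [List.eq_nil_iff_forall_not_mem]
      intro x hx
      rw [PySem.Set.mem_discard] at hx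
      exact hx.2 (hall x (List.mem_cons_of_mem _ ((PySem.Set.mem_ofList _ _).1 hx.1)))
    rw [PySem.Set.ofList_cons, hdis]
    simp [PySem.Set.len]

-- ===== VERDICT (by name: the statement is the Claim_ definition above) =====
theorem error_pattern_spec : Claim_equal_error_pattern := by
  intro alist _ hpre
  unfold Spec_error_pattern error_pattern error_pattern_alt
  by_cases hg : PySem.Set.len (PySem.Set.ofList alist) = 1
  · simp only [if_pos hg]
  · simp only [hg, if_false]
    have hne := pvMergeNonempty alist hpre hg
    cases hm : (PySem.Str.join "" alist).toList with
    | nil => exact absurd hm hne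
    | cons c0 rest =>
      obtain ⟨c', hA⟩ := pvFoldA rest c0 0 1 PySem.Set.empty (by simp [PySem.Set.empty])
      obtain ⟨a', hB⟩ := pvFoldB (c0 :: rest) 0 PySem.Set.empty (by simp [PySem.Set.empty])
      simp only [hm]
      rw [hA, hB]
      have hlen := pvRuns_length (c0 :: rest) 1 (by simp)
      simp only [pvBndL] at hlen hB
      rw [Prod.mk.injEq]
      refine ⟨?_, by simp [pvBndL]⟩
      rw [hlen]
      push_cast
      ring
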